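-- pv_equiv track=rewrite | github.com/MyBlackHole/python_learn | requests_learn/h5微博点赞/like.py | id_to_mid
-- ===== SOURCE A (Python) =====
-- import math
--
-- __ALPHABET = "0123456789abcdefghijklmnopqrstuvwxyzABCDEFGHIJKLMNOPQRSTUVWXYZ"
--
-- def base62_encode(num, alphabet=__ALPHABET):
--     """Encode a number in Base X
--
--     `num`: The number to encode
--     `alphabet`: The alphabet to use for encoding
--     """
--     if (num == 0):
--         return alphabet[0]
--     arr = []
--     base = len(alphabet)
--     while num:
--         rem = num % base
--         num = num // base
--         arr.append(alphabet[rem])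
--     arr.reverse()
--     return ''.join(arr)
--
-- def id_to_mid(id):
--     id = str(id)[::-1]
--     if len(id) % 7 == 0:
--         size = len(id) / 7
--     else:
--         size = len(id) / 7 + 1
--     size = math.floor(size)
--     result = []
--     for i in range(size):
--         s = id[i * 7: (i + 1) * 7][::-1]
--         s = base62_encode(int(s))
--         s_len = len(s)
--         if i < size - 1 and len(s) < 4:
--             s = '0' * (4 - s_len) + s
--         result.append(s)
--     result.reverse()
--     return ''.join(result)
-- ===== SOURCE B (Python) =====
-- _ALPHABET = "0123456789abcdefghijklmnopqrstuvwxyzABCDEFGHIJKLMNOPQRSTUVWXYZ"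
--
-- def _b62(n):
--     return _ALPHABET[n] if n < 62 else _b62(n // 62) + _ALPHABET[n % 62]
--
-- def id_to_mid(id):
--     s = str(id)
--     first = len(s) % 7 or 7
--     out = _b62(int(s[:first]))
--     for i in range(first, len(s), 7):
--         out += _b62(int(s[i:i + 7])).rjust(4, '0')
--     return out
-- ===== Notes on version B (the rewrite author's own statement) =====
-- stated objective: simpler
-- what changed: B walks the decimal string left-to-right with a single forward chunking (first chunk = len%7 or 7) and a recursive base62 encoder, eliminating A's three string reversals, float-floor size computation and reversed result list.
-- outside the precondition, e.g. on id_to_mid(-1): A does not finish within the time limit, B returns 'Z'; on id_to_mid(-1234567): A raises ValueError, B raises ValueError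
import Mathlib
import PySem

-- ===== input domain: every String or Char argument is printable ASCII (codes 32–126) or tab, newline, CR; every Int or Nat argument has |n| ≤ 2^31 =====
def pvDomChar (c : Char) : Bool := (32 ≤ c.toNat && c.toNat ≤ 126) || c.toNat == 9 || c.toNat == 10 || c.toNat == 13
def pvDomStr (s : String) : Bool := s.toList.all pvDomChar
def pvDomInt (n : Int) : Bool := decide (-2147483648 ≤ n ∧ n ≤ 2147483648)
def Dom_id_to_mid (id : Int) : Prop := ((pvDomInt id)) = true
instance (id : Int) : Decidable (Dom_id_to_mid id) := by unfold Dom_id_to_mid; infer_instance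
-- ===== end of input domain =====

-- B eliminates A's three string reversals and reversed result list by chunking the decimal
-- string left-to-right (first chunk = len % 7 or 7) with a recursive base62 encoder (simpler).

-- ===== PORT A =====

def pvAlpha : List Char := "0123456789abcdefghijklmnopqrstuvwxyzABCDEFGHIJKLMNOPQRSTUVWXYZ".toList

-- 'while num: rem = num % 62; num //= 62; arr.append(alphabet[rem])'
-- (for num < 0 Python's loop never terminates — such num only arise for id < 0, outside Pre_;
--  the 'num < 0 → arr' branch is a totality guard for that unreachable case)
def pvB62LoopA (num : Int) (arr : List Char) : List Char :=
  if num = 0 then arr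
  else if num < 0 then arr
  else pvB62LoopA (PySem.Int.floordiv num 62)
         (arr ++ [(PySem.List.pyGet? pvAlpha (PySem.Int.mod num 62)).getD ' '])
termination_by num.toNat
decreasing_by
  rw [PySem.Int.floordiv_eq_ediv_of_pos (by omega)]
  omega

def pvBase62A (num : Int) : List Char :=
  if num = 0 then [(PySem.List.pyGet? pvAlpha 0).getD ' ']   -- alphabet[0]
  else (pvB62LoopA num []).reverse                           -- arr.reverse(); ''.join(arr)

-- strings are carried as List Char; ''.join of char lists is concatenation (PySem.Chars.join lemmas),
-- s[::-1] is List.reverse (PySem.List.slice?_none_none_neg_one)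
def id_to_mid (id : Int) : String :=
  let idC : List Char := (PySem.Int.toChars id).reverse          -- id = str(id)[::-1]
  let n : Int := (idC.length : Int)
  -- Python computes size via float '/' then math.floor: exact floor division at these lengths
  let size : Int := if PySem.Int.mod n 7 = 0 then PySem.Int.floordiv n 7
                    else PySem.Int.floordiv n 7 + 1
  let result : List (List Char) :=
    (PySem.List.pyRange 0 size 1).foldl (fun result i =>
      let s := (PySem.List.slice idC (some (i * 7)) (some ((i + 1) * 7))).reverse
      -- int(s): ValueError only reachable for id < 0 (outside Pre_), where the '-' lands in a chunk
      let e := pvBase62A ((PySem.Int.ofChars? s).getD 0)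
      let e := if i < size - 1 ∧ e.length < 4 then List.replicate (4 - e.length) '0' ++ e else e
      result ++ [e]) []
  String.ofList result.reverse.flatten                               -- result.reverse(); ''.join(result)

-- ===== PORT B =====

-- _b62(n) = A_[n] if n < 62 else _b62(n // 62) + A_[n % 62]
-- (negative n only arise for id < 0, outside Pre_)
def pvB62B (n : Int) : List Char :=
  if n < 62 then [(PySem.List.pyGet? pvAlpha n).getD ' ']
  else pvB62B (PySem.Int.floordiv n 62) ++ [(PySem.List.pyGet? pvAlpha (PySem.Int.mod n 62)).getD ' ']
termination_by n.toNat
decreasing_by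
  rw [PySem.Int.floordiv_eq_ediv_of_pos (by omega)]
  omega

def id_to_mid_alt (id : Int) : String :=
  let s : List Char := PySem.Int.toChars id                      -- s = str(id)
  let len : Int := (s.length : Int)
  let first : Int := if PySem.Int.mod len 7 = 0 then 7 else PySem.Int.mod len 7  -- len(s) % 7 or 7
  let out := pvB62B ((PySem.Int.ofChars? (PySem.List.slice s none (some first))).getD 0)
  let out := (PySem.List.pyRange first len 7).foldl (fun out i =>
      let e := pvB62B ((PySem.Int.ofChars? (PySem.List.slice s (some i) (some (i + 7)))).getD 0)
      out ++ (if e.length < 4 then List.replicate (4 - e.length) '0' ++ e else e)) out  -- .rjust(4,'0')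
  String.ofList out

-- ===== PRECONDITION & SPEC =====

-- Pre_ excludes negative ids: there A never returns (base62_encode loops forever on the negative
-- final chunk, or int('-') raises ValueError when the chunk is the bare sign).
def Pre_id_to_mid (id : Int) : Prop := 0 ≤ id
instance (id : Int) : Decidable (Pre_id_to_mid id) := by unfold Pre_id_to_mid; infer_instance
def pvWitness_id_to_mid : Int := (1234567890)

def Spec_id_to_mid (id : Int) (out : String) : Prop := out = id_to_mid_alt id
instance (id : Int) (out : String) : Decidable (Spec_id_to_mid id out) := by unfold Spec_id_to_mid; infer_instance

-- ===== CLAIM (what is proved, stated in full; the proofs are below) =====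
def Claim_equal_id_to_mid : Prop := ∀ (id : Int), Dom_id_to_mid id → Pre_id_to_mid id → Spec_id_to_mid id (id_to_mid id)

-- ===== LEMMAS AND PROOFS =====

theorem pv_digitChar_ne_minus (m : Nat) (h : m < 10) : Nat.digitChar m ≠ '-' := by
  interval_cases m <;> decide

theorem pv_toDigitsCore_no_minus (f n : Nat) (ds : List Char) (hds : '-' ∉ ds) :
    '-' ∉ Nat.toDigitsCore 10 f n ds := by
  induction f generalizing n ds with
  | zero => simpa [Nat.toDigitsCore] using hds
  | succ f ih =>
    simp only [Nat.toDigitsCore]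
    have hd : '-' ∉ (Nat.digitChar (n % 10) :: ds) := by
      intro hmem
      rcases List.mem_cons.mp hmem with h1 | h1
      · exact pv_digitChar_ne_minus (n % 10) (Nat.mod_lt _ (by omega)) h1.symm
      · exact hds h1
    split
    · exact hd
    · exact ih _ _ hd

theorem pv_toDigitsCore_len (f n : Nat) (ds : List Char) :
    ds.length ≤ (Nat.toDigitsCore 10 f n ds).length := by
  induction f generalizing n ds with
  | zero => simp [Nat.toDigitsCore]
  | succ f ih =>
    simp only [Nat.toDigitsCore]
    split
    · simp
    · exact le_trans (by simp) (ih _ (Nat.digitChar (n % 10) :: ds))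

theorem pv_toChars_no_minus (id : Int) (h : 0 ≤ id) : '-' ∉ PySem.Int.toChars id := by
  simp only [PySem.Int.toChars, if_neg (by omega : ¬ id < 0)]
  exact pv_toDigitsCore_no_minus _ _ _ (by simp)

theorem pv_toChars_ne_nil (id : Int) (h : 0 ≤ id) : PySem.Int.toChars id ≠ [] := by
  simp only [PySem.Int.toChars, if_neg (by omega : ¬ id < 0), Nat.toDigits]
  simp only [Nat.toDigitsCore]
  split
  · simp
  · intro hc
    have hl := pv_toDigitsCore_len (id.toNat) (id.toNat / 10) [Nat.digitChar (id.toNat % 10)]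
    rw [hc] at hl
    simp at hl

theorem pv_doNat (o : Option Nat) (v : Int)
    (h : (do let a ← o; pure ((a : Nat) : Int)) = some v) : 0 ≤ v := by
  cases o with
  | none => simp at h
  | some a =>
    simp at h
    omega

theorem pv_ofChars_nonneg (cs : List Char) (h : '-' ∉ cs) :
    0 ≤ (PySem.Int.ofChars? cs).getD 0 := by
  cases hd : PySem.Int.ofChars? cs with
  | none => simp
  | some v =>
    simp only [Option.getD_some]
    simp only [PySem.Int.ofChars?] at hd
    have hsub : ∀ x ∈ (List.dropWhile PySem.Int.isIntSpace (List.dropWhile PySem.Int.isIntSpace cs).reverse).reverse, x ∈ cs := by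
      intro x hx
      rw [List.mem_reverse] at hx
      have hx2 := (List.dropWhile_sublist (l := (List.dropWhile PySem.Int.isIntSpace cs).reverse) PySem.Int.isIntSpace).subset hx
      rw [List.mem_reverse] at hx2
      exact (List.dropWhile_sublist _).subset hx2
    generalize hg : (List.dropWhile PySem.Int.isIntSpace (List.dropWhile PySem.Int.isIntSpace cs).reverse).reverse = cs' at hd hsub
    split at hd
    · exact absurd (hsub _ (by simp)) h
    · rw [Option.map_eq_some_iff] at hd
      obtain ⟨n, hn, hv⟩ := hd
      have := pv_doNat _ _ hn
      omega
    · rw [Option.map_eq_some_iff] at hd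
      obtain ⟨n, hn, hv⟩ := hd
      have := pv_doNat _ _ hn
      omega

theorem pv_b62_loop (N : Nat) : ∀ v : Int, v.toNat ≤ N → 0 < v → ∀ arr,
    (pvB62LoopA v arr).reverse = pvB62B v ++ arr.reverse := by
  induction N with
  | zero => intro v h1 h2; omega
  | succ N ih =>
    intro v h1 h2 arr
    have hfd : PySem.Int.floordiv v 62 = v / 62 := PySem.Int.floordiv_eq_ediv_of_pos (by omega)
    have hmd : PySem.Int.mod v 62 = v % 62 := PySem.Int.mod_eq_emod_of_pos (by omega)
    rw [pvB62LoopA, if_neg (by omega), if_neg (by omega)]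
    by_cases h62 : v < 62
    · have hz : PySem.Int.floordiv v 62 = 0 := by omega
      rw [hz, pvB62LoopA, if_pos rfl, List.reverse_append]
      rw [pvB62B, if_pos h62]
      have : PySem.Int.mod v 62 = v := by omega
      rw [this]
      simp
    · have hpos : 0 < PySem.Int.floordiv v 62 := by omega
      have hle : (PySem.Int.floordiv v 62).toNat ≤ N := by rw [hfd]; omega
      rw [ih _ hle hpos]
      conv_rhs => rw [pvB62B.eq_def]
      rw [if_neg (by omega)]
      simp [List.append_assoc]

theorem pv_b62_eq (v : Int) (h : 0 ≤ v) : pvBase62A v = pvB62B v := by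
  rcases eq_or_lt_of_le h with h0 | h0
  · rw [pvBase62A, ← h0, if_pos rfl, pvB62B, if_pos (by norm_num)]
  · rw [pvBase62A, if_neg (by omega)]
    have := pv_b62_loop v.toNat v le_rfl h0 []
    simpa using this

theorem pv_range_flip {α : Type} (F : Nat → List α) (k : Nat) :
    ((List.range k).map (fun i => F (k - 1 - i))).reverse = (List.range k).map F := by
  induction k with
  | zero => simp
  | succ k ih =>
    conv_lhs => rw [List.range_succ_eq_map]
    conv_rhs => rw [List.range_succ]
    simp only [List.map_cons, List.map_map, List.reverse_cons, List.map_append]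
    have h1 : (List.range k).map ((fun i => F (k + 1 - 1 - i)) ∘ Nat.succ)
         = (List.range k).map (fun i => F (k - 1 - i)) :=
      List.map_congr_left (fun i hi => by
        have : i < k := List.mem_range.mp hi
        simp only [Function.comp]
        congr 1
        omega)
    rw [h1, ih]
    simp

def pvFA (L : List Char) (k i : Nat) : List Char :=
  let c := (L.take (L.length - 7*i)).drop (L.length - 7*i - 7)
  let e := pvBase62A ((PySem.Int.ofChars? c).getD 0)
  if i < k - 1 ∧ e.length < 4 then List.replicate (4 - e.length) '0' ++ e else e

def pvF (L : List Char) (fst j : Nat) : List Char :=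
  if j = 0 then pvB62B ((PySem.Int.ofChars? (L.take fst)).getD 0)
  else
    let e := pvB62B ((PySem.Int.ofChars? ((L.drop (fst + 7*(j-1))).take 7)).getD 0)
    if e.length < 4 then List.replicate (4 - e.length) '0' ++ e else e

theorem pv_A_closed (id : Int) (h : 0 ≤ id) :
    id_to_mid id = String.ofList ((((List.range (((PySem.Int.toChars id).length + 6)/7)).map
      (pvFA (PySem.Int.toChars id) (((PySem.Int.toChars id).length + 6)/7))).reverse).flatten) := by
  have hn1 : 1 ≤ (PySem.Int.toChars id).length :=
    List.length_pos_iff.mpr (pv_toChars_ne_nil id h)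
  simp only [id_to_mid, List.length_reverse]
  set L := PySem.Int.toChars id with hLdef
  set n := L.length with hndef
  have hmod : PySem.Int.mod (n:Int) 7 = ((n % 7 : Nat):Int) := by
    exact_mod_cast PySem.Int.mod_natCast n 7
  have hdiv : PySem.Int.floordiv (n:Int) 7 = ((n / 7 : Nat):Int) := by
    exact_mod_cast PySem.Int.floordiv_natCast n 7
  have hsize : (if PySem.Int.mod (n:Int) 7 = 0 then PySem.Int.floordiv (n:Int) 7
      else PySem.Int.floordiv (n:Int) 7 + 1) = (((n + 6)/7 : Nat):Int) := by
    rw [hmod, hdiv]; split_ifs with hc <;> omega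
  rw [hsize, PySem.List.pyRange_zero_natCast, List.foldl_map,
    PySem.List.foldl_append_singleton_eq_map]
  simp only [List.nil_append]
  refine congrArg _ (congrArg _ (congrArg _ (List.map_congr_left ?_)))
  intro y hy
  have hyk : y < (n + 6) / 7 := List.mem_range.mp hy
  have hc : (PySem.List.slice L.reverse (some ((y:Int) * 7)) (some (((y:Int) + 1) * 7))).reverse
      = (L.take (n - 7*y)).drop (n - 7*y - 7) := by
    have h1 : ((y:Int)*7) = ((7*y : Nat) : Int) := by push_cast; ring
    have h2 : (((y:Int))+1)*7 = ((7*y+7 : Nat) : Int) := by push_cast; ring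
    rw [h1, h2, PySem.List.slice_natCast]
    have h3 : 7*y+7 - 7*y = 7 := by omega
    rw [h3, List.drop_reverse, ← hndef, List.take_reverse, List.reverse_reverse,
      List.length_take, min_eq_left (by omega : n - 7*y ≤ n)]
  have hcond : (((y:Int) < ((((n+6)/7 : Nat)):Int) - 1)) ↔ (y < (n+6)/7 - 1) := by omega
  simp only [pvFA, hc, hcond, ← hndef]

theorem pv_B_closed (id : Int) (h : 0 ≤ id) :
    id_to_mid_alt id = String.ofList (pvF (PySem.Int.toChars id)
        (if (PySem.Int.toChars id).length % 7 = 0 then 7 else (PySem.Int.toChars id).length % 7) 0 ++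
      (List.range (((PySem.Int.toChars id).length + 6)/7 - 1)).flatMap
        (fun j => pvF (PySem.Int.toChars id)
          (if (PySem.Int.toChars id).length % 7 = 0 then 7 else (PySem.Int.toChars id).length % 7) (j+1))) := by
  have hn1 : 1 ≤ (PySem.Int.toChars id).length :=
    List.length_pos_iff.mpr (pv_toChars_ne_nil id h)
  simp only [id_to_mid_alt]
  set L := PySem.Int.toChars id with hLdef
  set n := L.length with hndef
  set fst := (if n % 7 = 0 then 7 else n % 7) with hfstdef
  have hfst : 1 ≤ fst ∧ fst ≤ 7 ∧ n = fst + 7*((n+6)/7 - 1) := by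
    rw [hfstdef]; split_ifs with hc <;> omega
  have hmod : PySem.Int.mod (n:Int) 7 = ((n % 7 : Nat):Int) := by
    exact_mod_cast PySem.Int.mod_natCast n 7
  have hfirst : (if PySem.Int.mod (↑n) 7 = 0 then (7:Int) else PySem.Int.mod (↑n) 7)
      = ((fst:Nat):Int) := by
    rw [hmod, hfstdef]
    split_ifs with hc1 hc2 hc2 <;> push_cast <;> omega
  rw [hfirst, PySem.List.slice_to_natCast]
  have hcount : PySem.List.pyRange (↑fst) (↑n) 7
      = (List.range ((n+6)/7 - 1)).map (fun (j : Nat) => (fst:Int) + 7*(j:Int)) := by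
    rw [PySem.List.pyRange_of_pos _ _ (by norm_num)]
    have hcnt : (if (fst:Int) < (n:Int) then (((n:Int) - (fst:Int) + 7 - 1)/7).toNat else 0)
        = (n+6)/7 - 1 := by split_ifs with hc <;> omega
    rw [hcnt]
  rw [hcount, List.foldl_map, PySem.List.foldl_append_eq_flatMap]
  have hF0 : pvF L fst 0 = pvB62B ((PySem.Int.ofChars? (L.take fst)).getD 0) := by
    simp [pvF]
  rw [hF0]
  refine congrArg _ (congrArg _ ?_)
  rw [List.flatMap_def, List.flatMap_def]
  refine congrArg _ (List.map_congr_left ?_)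
  intro j hj
  have h1 : ((fst:Int) + 7*(j:Int)) = ((fst + 7*j : Nat) : Int) := by push_cast; ring
  have h2 : (((fst + 7*j : Nat) : Int) + 7) = ((fst + 7*j + 7 : Nat) : Int) := by push_cast; ring
  rw [h1, h2, PySem.List.slice_natCast]
  have h3 : fst + 7*j + 7 - (fst + 7*j) = 7 := by omega
  rw [h3]
  simp [pvF]

theorem pv_corr (id : Int) (h : 0 ≤ id) :
    ∀ i < ((PySem.Int.toChars id).length + 6)/7,
      pvFA (PySem.Int.toChars id) (((PySem.Int.toChars id).length + 6)/7) i
      = pvF (PySem.Int.toChars id)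
          (if (PySem.Int.toChars id).length % 7 = 0 then 7 else (PySem.Int.toChars id).length % 7)
          (((PySem.Int.toChars id).length + 6)/7 - 1 - i) := by
  have hn1 : 1 ≤ (PySem.Int.toChars id).length :=
    List.length_pos_iff.mpr (pv_toChars_ne_nil id h)
  set L := PySem.Int.toChars id with hLdef
  set n := L.length with hndef
  set k := (n+6)/7 with hkdef
  set fst := (if n % 7 = 0 then 7 else n % 7) with hfstdef
  have hfst : 1 ≤ fst ∧ fst ≤ 7 ∧ n = fst + 7*(k-1) := by
    rw [hfstdef, hkdef]; split_ifs with hc <;> omega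
  intro i hik
  have hsubA : '-' ∉ (L.take (n - 7*i)).drop (n - 7*i - 7) := fun hm =>
    pv_toChars_no_minus id h ((List.take_sublist _ _).subset ((List.drop_sublist _ _).subset hm))
  have hnnA := pv_ofChars_nonneg _ hsubA
  by_cases hi : i = k - 1
  · subst hi
    have hkk : k - 1 - (k - 1) = 0 := by omega
    rw [hkk]
    simp only [pvFA, pvF]
    have hx1 : n - 7*(k-1) = fst := by omega
    have hx2 : fst - 7 = 0 := by omega
    rw [hx1, hx2, List.drop_zero, if_neg (by omega : ¬ (k - 1 < k - 1 ∧
      (pvBase62A ((PySem.Int.ofChars? (L.take fst)).getD 0)).length < 4))]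
    have hsub' : '-' ∉ L.take fst := fun hm =>
      pv_toChars_no_minus id h ((List.take_sublist _ _).subset hm)
    exact pv_b62_eq _ (pv_ofChars_nonneg _ hsub')
  · have hik1 : i < k - 1 := by omega
    have hj0 : k - 1 - i ≠ 0 := by omega
    have hj1 : k - 1 - i - 1 = k - 2 - i := by omega
    simp only [pvFA, pvF, if_neg hj0, hj1]
    have hx1 : List.drop (n - 7*i - 7) (List.take (n - 7*i) L)
        = List.take 7 (List.drop (fst + 7*(k-2-i)) L) := by
      rw [List.drop_take]
      have e1 : n - 7*i - (n - 7*i - 7) = 7 := by omega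
      have e2 : n - 7*i - 7 = fst + 7*(k-2-i) := by omega
      rw [e1, e2]
    rw [hx1] at hnnA ⊢
    rw [pv_b62_eq _ hnnA]
    simp [hik1]

-- ===== VERDICT (by name: the statement is the Claim_ definition above) =====
theorem id_to_mid_spec : Claim_equal_id_to_mid := by
  intro id _ hpre
  unfold Spec_id_to_mid
  have h : 0 ≤ id := hpre
  rw [pv_A_closed id h, pv_B_closed id h]
  rw [List.map_congr_left (fun i hi => pv_corr id h i (List.mem_range.mp hi))]
  rw [pv_range_flip]
  have hn1 : 1 ≤ (PySem.Int.toChars id).length :=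
    List.length_pos_iff.mpr (pv_toChars_ne_nil id h)
  set n := (PySem.Int.toChars id).length with hndef
  have hk : (n + 6)/7 = ((n + 6)/7 - 1) + 1 := by omega
  rw [hk, List.range_succ_eq_map, List.map_cons, List.flatten_cons, List.map_map,
    List.flatMap_def]
  simp [Function.comp_def]
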